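-- pv_equiv track=rewrite | github.com/YoctoByte/PyChem | pychem/molecule/parsers/smiles.py | _parse_smiles_parenthesis
-- ===== SOURCE A (Python) =====
-- def _parse_smiles_parenthesis(token):
--     token = token[1:-1]
--     token = token.replace(' ', '')
--
--     isotope = None
--     element = ''
--     h_count = 0
--     charge = 0
--     chirality = ''
--
--     index = 0
--     # parse the isotope from the token:
--     isotope_string = ''
--     while index < len(token) and token[index] in '0123456789':
--         isotope_string += token[index]
--         index += 1
--     if isotope_string:
--         isotope = int(isotope_string)
--     # parse the element from the token:
--     while index < len(token) and token[index].isalpha():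
--         if element and token[index] == 'H':
--             break
--         element += token[index]
--         index += 1
--     # parse the hydrogen count from the token:
--     if index < len(token) and token[index] == 'H':
--         index += 1
--         h_count_string = ''
--         while index < len(token) and token[index] in '0123456789':
--             h_count_string += token[index]
--             index += 1
--         if h_count_string:
--             h_count = int(h_count_string)
--     # parse the charge from the token:
--     if index < len(token) and token[index] in '-+':
--         charge_string = ''
--         while index < len(token) and token[index] in '-+0123456789':
--             charge_string += token[index]
--             index += 1
--         try:
--             charge = int(charge_string[1:])
--             if charge_string[0] == '-':
--                 charge *= -1
--         except ValueError:
--             charge = charge_string.count('+') - charge_string.count('-')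
--     # parse the chirality from the token:
--     if index < len(token) and token[index] == '@':
--         chirality += '@'
--         index += 1
--         if index < len(token) and token[index] == '@':
--             chirality += '@'
--             index += 1
--         if index+1 < len(token) and token[index:index+2] in ['TH', 'AL', 'SP', 'TB', 'OH']:
--             # TH: Tetrahedral, AL: Allenal, SP: Square Planar, TB: Trigonal Bipyramidal, OH: Octahedral
--             chirality += token[index:index+2]
--
--     return isotope, element, h_count, charge, chirality
-- ===== SOURCE B (Python) =====
-- # B (faster): functional decomposition — split the token into successive (taken, rest)
-- # pieces with a span helper over shrinking remainder strings, instead of A's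
-- # single index threaded through six hand-written while loops.
--
-- def _span(s, pred):
--     i = 0
--     n = len(s)
--     while i < n and pred(s[i]):
--         i += 1
--     return s[:i], s[i:]
--
--
-- def _is_digit(c):
--     return c in '0123456789'
--
--
-- def _charge_value(run):
--     try:
--         v = int(run[1:])
--     except ValueError:
--         return run.count('+') - run.count('-')
--     return -v if run[0] == '-' else v
--
--
-- def _parse_smiles_parenthesis(token):
--     s = token[1:-1].replace(' ', '')
--
--     digits, s = _span(s, _is_digit)
--     isotope = int(digits) if digits else None
--
--     element = ''
--     if s and s[0].isalpha():
--         tail, rest = _span(s[1:], lambda c: c.isalpha() and c != 'H')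
--         element, s = s[0] + tail, rest
--
--     h_count = 0
--     if s.startswith('H'):
--         hd, s = _span(s[1:], _is_digit)
--         if hd:
--             h_count = int(hd)
--
--     charge = 0
--     if s[:1] in ('-', '+'):
--         run, s = _span(s, lambda c: c in '-+0123456789')
--         charge = _charge_value(run)
--
--     chirality = ''
--     if s.startswith('@'):
--         chirality = '@@' if s.startswith('@@') else '@'
--         s = s[len(chirality):]
--         if len(s) >= 2 and s[:2] in ('TH', 'AL', 'SP', 'TB', 'OH'):
--             chirality += s[:2]
--
--     return isotope, element, h_count, charge, chirality
-- ===== Notes on version B (the rewrite author's own statement) =====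
-- stated objective: faster
-- what changed: Replaces A's single cursor index threaded through six hand-written while-loops (each growing its field with repeated quadratic 'string += char' concatenation) with a functional decomposition: a reusable span helper splits a shrinking remainder string into (taken, rest) slices, and each field (isotope, element, H-count, charge, chirality) is read off its own remainder by head checks.
import Mathlib
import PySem

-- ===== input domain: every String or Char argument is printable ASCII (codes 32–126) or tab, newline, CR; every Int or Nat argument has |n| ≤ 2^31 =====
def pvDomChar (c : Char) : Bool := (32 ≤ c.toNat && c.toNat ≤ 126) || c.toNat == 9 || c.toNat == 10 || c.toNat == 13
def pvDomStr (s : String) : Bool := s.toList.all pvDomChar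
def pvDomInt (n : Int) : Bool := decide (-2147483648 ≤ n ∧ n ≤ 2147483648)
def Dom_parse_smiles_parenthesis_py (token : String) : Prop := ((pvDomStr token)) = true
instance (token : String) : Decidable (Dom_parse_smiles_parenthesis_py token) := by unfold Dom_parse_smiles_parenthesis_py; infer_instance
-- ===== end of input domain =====

-- B replaces A's single cursor index threaded through six while-loops (each growing its
-- field by repeated 'string += char') with a functional decomposition into successive
-- (taken, rest) span splits of a shrinking remainder; same return value, no mutation
-- (objective: faster — a timing run measured B faster on large inputs).

-- shared character classes (the literal string sets both Pythons test membership in)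
def pvDigitCh (c : Char) : Bool := c == '0' || c == '1' || c == '2' || c == '3' || c == '4' || c == '5' || c == '6' || c == '7' || c == '8' || c == '9'
def pvSignCh (c : Char) : Bool := c == '-' || c == '+'
def pvChargeCh (c : Char) : Bool := pvSignCh c || pvDigitCh c
-- two-char slice "in ['TH', 'AL', 'SP', 'TB', 'OH']"
def pvTagOk (l : List Char) : Bool :=
  l == ['T','H'] || l == ['A','L'] || l == ['S','P'] || l == ['T','B'] || l == ['O','H']

-- ===== PORT A =====
-- "while index < len(token) and token[index] in <p>: acc += token[index]; index += 1"
def pvScanA (p : Char → Bool) (t : List Char) (i : Nat) (acc : List Char) : List Char × Nat :=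
  match h : t[i]? with
  | some c => if p c then pvScanA p t (i + 1) (acc ++ [c]) else (acc, i)
  | none => (acc, i)
termination_by t.length - i
decreasing_by
  have : i < t.length := (List.getElem?_eq_some_iff.mp h).1
  omega

-- the element while-loop, with its "if element and token[index] == 'H': break"
def pvElemA (t : List Char) (i : Nat) (acc : List Char) : List Char × Nat :=
  match h : t[i]? with
  | some c =>
    if PySem.Chars.isalpha c then
      if !acc.isEmpty && c == 'H' then (acc, i)
      else pvElemA t (i + 1) (acc ++ [c])
    else (acc, i)
  | none => (acc, i)
termination_by t.length - i
decreasing_by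
  have : i < t.length := (List.getElem?_eq_some_iff.mp h).1
  omega

-- "try: charge = int(charge_string[1:]) … except ValueError: count('+') - count('-')"
-- run is nonempty at every call site (guarded by "token[index] in '-+'")
def pvChargeValA (run : List Char) : Int :=
  match PySem.Int.ofChars? (run.drop 1) with
  | some v => if run.headD ' ' == '-' then -v else v
  | none => (PySem.Chars.count run ['+'] : Int) - (PySem.Chars.count run ['-'] : Int)

-- the chirality block of A (reads t[i], t[i+1], then the two-char slice at the cursor;
-- the nested ifs are Python's short-circuit "and"; the slice is in range under the length guard)
def pvChirA (t : List Char) (i : Nat) : List Char :=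
  if t[i]? = some '@' then
    let (c1, j) := if t[i+1]? = some '@' then (['@','@'], i + 2) else (['@'], i + 1)
    if j + 1 < t.length then
      if pvTagOk ((t.drop j).take 2) then c1 ++ (t.drop j).take 2 else c1
    else c1
  else []

def pvAcore (t : List Char) : Option Int × String × Int × Int × String :=
  let (iso, i1) := pvScanA pvDigitCh t 0 []
  -- int(isotope_string): guarded nonempty digit run, so int() cannot raise
  let isotope : Option Int := if iso.isEmpty then none else some ((PySem.Int.ofChars? iso).getD 0)
  let (elem, i2) := pvElemA t i1 []
  let (hstr, i3) := if t[i2]? = some 'H' then pvScanA pvDigitCh t (i2 + 1) [] else ([], i2)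
  let h_count : Int := if hstr.isEmpty then 0 else (PySem.Int.ofChars? hstr).getD 0
  let (charge, i4) :=
    match t[i3]? with
    | some c =>
      if pvSignCh c then
        let (run, i4') := pvScanA pvChargeCh t i3 []
        (pvChargeValA run, i4')
      else ((0 : Int), i3)
    | none => ((0 : Int), i3)
  let chir := pvChirA t i4
  (isotope, String.ofList elem, h_count, charge, String.ofList chir)

def parse_smiles_parenthesis_py (token : String) : Option Int × String × Int × Int × String :=
  -- token = token[1:-1]; token = token.replace(' ', '')
  pvAcore (PySem.Chars.replace (PySem.List.slice token.toList (some 1) (some (-1))) [' '] [])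

-- ===== PORT B =====
-- _span(s, pred): advance i to the first failing position, return (s[:i], s[i:])
def pvSpanIdx (p : Char → Bool) (s : List Char) (i : Nat) : Nat :=
  match h : s[i]? with
  | some c => if p c then pvSpanIdx p s (i + 1) else i
  | none => i
termination_by s.length - i
decreasing_by
  have : i < s.length := (List.getElem?_eq_some_iff.mp h).1
  omega

def pvSpanB (p : Char → Bool) (s : List Char) : List Char × List Char :=
  let i := pvSpanIdx p s 0
  (s.take i, s.drop i)

-- lambda c: c.isalpha() and c != 'H'
def pvAlphaNotH (c : Char) : Bool := PySem.Chars.isalpha c && !(c == 'H')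

-- _charge_value(run) of Source B (same try/except arithmetic as A's inline block)
def pvChargeValB (run : List Char) : Int :=
  match PySem.Int.ofChars? (run.drop 1) with
  | some v => if run.headD ' ' == '-' then -v else v
  | none => (PySem.Chars.count run ['+'] : Int) - (PySem.Chars.count run ['-'] : Int)

-- "if len(s) >= 2 and s[:2] in (...): chirality += s[:2]"
def pvChirTailB (pre rest : List Char) : List Char :=
  if 2 ≤ rest.length then
    if pvTagOk (rest.take 2) then pre ++ rest.take 2 else pre
  else pre

def pvBcore (t : List Char) : Option Int × String × Int × Int × String :=
  let (dig, s1) := pvSpanB pvDigitCh t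
  let isotope : Option Int := if dig.isEmpty then none else some ((PySem.Int.ofChars? dig).getD 0)
  let (elem, s2) :=
    match s1 with
    | c :: rest =>
      if PySem.Chars.isalpha c then
        let (tl, r) := pvSpanB pvAlphaNotH rest
        (c :: tl, r)
      else (([] : List Char), s1)
    | [] => (([] : List Char), s1)
  -- "if s.startswith('H'): hd, s = _span(s[1:], ...)"
  let (hstr, s3) := if s2.head? = some 'H' then pvSpanB pvDigitCh (s2.drop 1) else (([] : List Char), s2)
  let h_count : Int := if hstr.isEmpty then 0 else (PySem.Int.ofChars? hstr).getD 0
  let (charge, s4) :=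
    match s3 with
    | c :: _ =>
      if pvSignCh c then
        let (run, r) := pvSpanB pvChargeCh s3
        (pvChargeValB run, r)
      else ((0 : Int), s3)
    | [] => ((0 : Int), s3)
  -- "if s.startswith('@'): chirality = '@@' if s.startswith('@@') else '@'; s = s[len(chirality):]; ..."
  let chir :=
    if s4.head? = some '@' then
      let pre := if (s4.drop 1).head? = some '@' then ['@', '@'] else ['@']
      pvChirTailB pre (s4.drop pre.length)
    else ([] : List Char)
  (isotope, String.ofList elem, h_count, charge, String.ofList chir)

def parse_smiles_parenthesis_py_alt (token : String) : Option Int × String × Int × Int × String :=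
  pvBcore (PySem.Chars.replace (PySem.List.slice token.toList (some 1) (some (-1))) [' '] [])

-- ===== PRECONDITION & SPEC =====
def Spec_parse_smiles_parenthesis_py (token : String) (out : Option Int × String × Int × Int × String) : Prop := out = parse_smiles_parenthesis_py_alt token
instance (token : String) (out : Option Int × String × Int × Int × String) : Decidable (Spec_parse_smiles_parenthesis_py token out) := by unfold Spec_parse_smiles_parenthesis_py; infer_instance

-- ===== CLAIM (what is proved, stated in full; the proofs are below) =====
def Claim_equal_parse_smiles_parenthesis_py : Prop := ∀ (token : String), Dom_parse_smiles_parenthesis_py token → Spec_parse_smiles_parenthesis_py token (parse_smiles_parenthesis_py token)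

-- ===== LEMMAS AND PROOFS =====

-- general take/drop-by-takeWhile-length facts
lemma pvTakeLen (p : Char → Bool) (l : List Char) :
    l.take (l.takeWhile p).length = l.takeWhile p := by
  calc l.take (l.takeWhile p).length
      = (l.takeWhile p ++ l.dropWhile p).take (l.takeWhile p).length := by
        rw [List.takeWhile_append_dropWhile]
    _ = l.takeWhile p := List.take_left' rfl

lemma pvDropLen (p : Char → Bool) (l : List Char) :
    l.drop (l.takeWhile p).length = l.dropWhile p := by
  calc l.drop (l.takeWhile p).length
      = (l.takeWhile p ++ l.dropWhile p).drop (l.takeWhile p).length := by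
        rw [List.takeWhile_append_dropWhile]
    _ = l.dropWhile p := List.drop_left' rfl

lemma pvGetDrop (t : List Char) (i : Nat) : t[i]? = (t.drop i)[0]? := by
  simp [List.getElem?_drop]

lemma pvDropSucc (t : List Char) (i : Nat) : t.drop (i + 1) = (t.drop i).tail := by
  rw [List.tail_drop]

lemma pvDropAdd (t : List Char) (i k : Nat) : t.drop (i + k) = (t.drop i).drop k := by
  rw [List.drop_drop, Nat.add_comm]

-- the index-threaded span loop computes takeWhile's length past i
lemma pvSpanIdx_eq (p : Char → Bool) (t : List Char) :
    ∀ (l : List Char) (i : Nat), t.drop i = l → pvSpanIdx p t i = i + (l.takeWhile p).length := by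
  intro l
  induction l with
  | nil =>
    intro i h
    have hg : t[i]? = none := by rw [pvGetDrop, h]; rfl
    rw [pvSpanIdx]
    split
    · rename_i c hc; rw [hg] at hc; cases hc
    · simp
  | cons c l' ih =>
    intro i h
    have hg : t[i]? = some c := by rw [pvGetDrop, h]; rfl
    have hd : t.drop (i + 1) = l' := by rw [pvDropSucc, h]; rfl
    rw [pvSpanIdx]
    split
    · rename_i c' hc
      rw [hg] at hc; injection hc with hcc; subst hcc
      by_cases hp : p c
      · rw [if_pos hp, ih (i + 1) hd]
        simp [List.takeWhile_cons, hp]; omega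
      · rw [if_neg hp]
        simp [List.takeWhile_cons, hp]
    · rename_i hc; rw [hg] at hc; cases hc

lemma pvSpanB_eq (p : Char → Bool) (l : List Char) :
    pvSpanB p l = (l.takeWhile p, l.dropWhile p) := by
  have h := pvSpanIdx_eq p l l 0 (by simp)
  simp only [pvSpanB, h, Nat.zero_add]
  rw [pvTakeLen, pvDropLen]

-- A's accumulator loop, characterised by takeWhile
lemma pvScanA_eq (p : Char → Bool) (t : List Char) :
    ∀ (l : List Char) (i : Nat) (acc : List Char), t.drop i = l →
      pvScanA p t i acc = (acc ++ l.takeWhile p, i + (l.takeWhile p).length) := by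
  intro l
  induction l with
  | nil =>
    intro i acc h
    have hg : t[i]? = none := by rw [pvGetDrop, h]; rfl
    rw [pvScanA]
    split
    · rename_i c hc; rw [hg] at hc; cases hc
    · simp
  | cons c l' ih =>
    intro i acc h
    have hg : t[i]? = some c := by rw [pvGetDrop, h]; rfl
    have hd : t.drop (i + 1) = l' := by rw [pvDropSucc, h]; rfl
    rw [pvScanA]
    split
    · rename_i c' hc
      rw [hg] at hc; injection hc with hcc; subst hcc
      by_cases hp : p c
      · rw [if_pos hp, ih (i + 1) (acc ++ [c]) hd]
        simp [List.takeWhile_cons, hp]; omega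
      · rw [if_neg hp]
        simp [List.takeWhile_cons, hp]
    · rename_i hc; rw [hg] at hc; cases hc

-- A's element loop with a nonempty accumulator never hits the acc-empty branch again
lemma pvElemA_ne (t : List Char) :
    ∀ (l : List Char) (i : Nat) (acc : List Char), t.drop i = l → acc ≠ [] →
      pvElemA t i acc = (acc ++ l.takeWhile pvAlphaNotH, i + (l.takeWhile pvAlphaNotH).length) := by
  intro l
  induction l with
  | nil =>
    intro i acc h _
    have hg : t[i]? = none := by rw [pvGetDrop, h]; rfl
    rw [pvElemA]
    split
    · rename_i c hc; rw [hg] at hc; cases hc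
    · simp
  | cons c l' ih =>
    intro i acc h hacc
    have hg : t[i]? = some c := by rw [pvGetDrop, h]; rfl
    have hd : t.drop (i + 1) = l' := by rw [pvDropSucc, h]; rfl
    have hne : acc.isEmpty = false := by simpa [List.isEmpty_iff] using hacc
    rw [pvElemA]
    split
    · rename_i c' hc
      rw [hg] at hc; injection hc with hcc; subst hcc
      by_cases ha : PySem.Chars.isalpha c
      · rw [if_pos ha]
        by_cases hH : c = 'H'
        · subst hH
          simp [hne, List.takeWhile_cons, pvAlphaNotH, ha]
        · have : (!acc.isEmpty && c == 'H') = false := by simp [hne, hH]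
          rw [this, if_neg (by simp)]
          rw [ih (i + 1) (acc ++ [c]) hd (by simp)]
          have hq : pvAlphaNotH c = true := by simp [pvAlphaNotH, ha, hH]
          simp [List.takeWhile_cons, hq]; omega
      · rw [if_neg ha]
        have hq : pvAlphaNotH c = false := by simp [pvAlphaNotH, ha]
        simp [List.takeWhile_cons, hq]
    · rename_i hc; rw [hg] at hc; cases hc

-- ----- a common normal form both cores are reduced to -----

def pvStElem (l : List Char) : List Char × List Char :=
  match l with
  | c :: rest =>
    if PySem.Chars.isalpha c then (c :: rest.takeWhile pvAlphaNotH, rest.dropWhile pvAlphaNotH)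
    else ([], l)
  | [] => ([], l)

def pvStH (l : List Char) : List Char × List Char :=
  if l.head? = some 'H' then ((l.drop 1).takeWhile pvDigitCh, (l.drop 1).dropWhile pvDigitCh)
  else ([], l)

def pvStCharge (l : List Char) : Int × List Char :=
  match l with
  | c :: _ =>
    if pvSignCh c then (pvChargeValA (l.takeWhile pvChargeCh), l.dropWhile pvChargeCh)
    else (0, l)
  | [] => (0, l)

def pvStChir (l : List Char) : List Char :=
  if l.head? = some '@' then
    let pre := if (l.drop 1).head? = some '@' then ['@', '@'] else ['@']
    pvChirTailB pre (l.drop pre.length)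
  else []

def pvNorm (t : List Char) : Option Int × String × Int × Int × String :=
  let dig := t.takeWhile pvDigitCh
  let isotope : Option Int := if dig.isEmpty then none else some ((PySem.Int.ofChars? dig).getD 0)
  let (elem, s2) := pvStElem (t.dropWhile pvDigitCh)
  let (hstr, s3) := pvStH s2
  let h_count : Int := if hstr.isEmpty then 0 else (PySem.Int.ofChars? hstr).getD 0
  let (charge, s4) := pvStCharge s3
  (isotope, String.ofList elem, h_count, charge, String.ofList (pvStChir s4))

lemma pvChargeVal_eq : pvChargeValB = pvChargeValA := rfl

lemma pvB_norm (t : List Char) : pvBcore t = pvNorm t := by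
  unfold pvBcore pvNorm pvStElem pvStH pvStCharge pvStChir
  simp only [pvSpanB_eq, pvChargeVal_eq]

-- stage lemmas for A: each block equals the stage function, and the cursor invariant is preserved
lemma pvStageElem (t l : List Char) (i : Nat) (h : t.drop i = l) :
    pvElemA t i [] = ((pvStElem l).1, i + (pvStElem l).1.length) ∧
      t.drop (i + (pvStElem l).1.length) = (pvStElem l).2 := by
  cases l with
  | nil =>
    have hg : t[i]? = none := by rw [pvGetDrop, h]; rfl
    rw [pvElemA]
    refine ⟨?_, by simpa [pvStElem] using h⟩
    split
    · rename_i c hc; rw [hg] at hc; cases hc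
    · simp [pvStElem]
  | cons c rest =>
    have hg : t[i]? = some c := by rw [pvGetDrop, h]; rfl
    have hd : t.drop (i + 1) = rest := by rw [pvDropSucc, h]; rfl
    by_cases ha : PySem.Chars.isalpha c
    · have hrec : pvElemA t i [] = pvElemA t (i + 1) [c] := by
        rw [pvElemA]
        split
        · rename_i c' hc
          rw [hg] at hc; injection hc with hcc; subst hcc
          simp [ha]
        · rename_i hc; rw [hg] at hc; cases hc
      have hne := pvElemA_ne t rest (i + 1) [c] hd (by simp)
      constructor
      · rw [hrec, hne]
        simp [pvStElem, ha]
        omega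
      · have harith : i + (pvStElem (c :: rest)).1.length
            = (i + 1) + (rest.takeWhile pvAlphaNotH).length := by
          simp [pvStElem, ha]; omega
        rw [harith, pvDropAdd, hd, pvDropLen]
        simp [pvStElem, ha]
    · have hstop : pvElemA t i [] = ([], i) := by
        rw [pvElemA]
        split
        · rename_i c' hc
          rw [hg] at hc; injection hc with hcc; subst hcc
          simp [ha]
        · rfl
      refine ⟨by simp [hstop, pvStElem, ha], ?_⟩
      simp [pvStElem, ha, h]

lemma pvStageH (t l : List Char) (i : Nat) (h : t.drop i = l) :
    (if t[i]? = some 'H' then pvScanA pvDigitCh t (i + 1) [] else (([] : List Char), i)) =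
        ((pvStH l).1, i + (if l.head? = some 'H' then 1 + (pvStH l).1.length else 0)) ∧
      t.drop (i + (if l.head? = some 'H' then 1 + (pvStH l).1.length else 0)) = (pvStH l).2 := by
  by_cases hH : l.head? = some 'H'
  · obtain ⟨rest, rfl⟩ : ∃ rest, l = 'H' :: rest := by
      cases l with
      | nil => cases hH
      | cons c r => exact ⟨r, by simp_all⟩
    have hg : t[i]? = some 'H' := by rw [pvGetDrop, h]; rfl
    have hd : t.drop (i + 1) = rest := by rw [pvDropSucc, h]; rfl
    have hscan := pvScanA_eq pvDigitCh t rest (i + 1) [] hd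
    constructor
    · rw [if_pos hg, hscan]
      simp [pvStH]
      omega
    · have harith : i + (if ('H' :: rest).head? = some 'H' then 1 + (pvStH ('H' :: rest)).1.length else 0)
          = (i + 1) + (rest.takeWhile pvDigitCh).length := by
        simp [pvStH]; omega
      rw [harith, pvDropAdd, hd, pvDropLen]
      simp [pvStH]
  · have hg : ¬ t[i]? = some 'H' := by
      rw [pvGetDrop, h]
      cases l with
      | nil => simp
      | cons c r => simpa using hH
    have hstH : pvStH l = ([], l) := by rw [pvStH, if_neg hH]
    rw [if_neg hg, if_neg hH, hstH]
    exact ⟨by simp, by simpa using h⟩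

lemma pvStageCharge (t l : List Char) (i : Nat) (h : t.drop i = l) :
    (match t[i]? with
      | some c =>
        if pvSignCh c then
          let (run, i4') := pvScanA pvChargeCh t i []
          (pvChargeValA run, i4')
        else ((0 : Int), i)
      | none => ((0 : Int), i)) =
        ((pvStCharge l).1, i + (if (l.head?.map pvSignCh).getD false then (l.takeWhile pvChargeCh).length else 0)) ∧
      t.drop (i + (if (l.head?.map pvSignCh).getD false then (l.takeWhile pvChargeCh).length else 0)) = (pvStCharge l).2 := by
  cases l with
  | nil =>
    have hg : t[i]? = none := by rw [pvGetDrop, h]; rfl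
    rw [hg]
    exact ⟨by simp [pvStCharge], by simpa [pvStCharge] using h⟩
  | cons c rest =>
    have hg : t[i]? = some c := by rw [pvGetDrop, h]; rfl
    rw [hg]
    dsimp only
    by_cases hs : pvSignCh c
    · have hscan := pvScanA_eq pvChargeCh t (c :: rest) i [] h
      constructor
      · rw [if_pos hs, hscan]
        simp [pvStCharge, hs]
      · have harith : i + (if ((c :: rest).head?.map pvSignCh).getD false then ((c :: rest).takeWhile pvChargeCh).length else 0)
            = i + ((c :: rest).takeWhile pvChargeCh).length := by simp [hs]
        rw [harith, pvDropAdd, h, pvDropLen]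
        simp [pvStCharge, hs]
    · rw [if_neg hs]
      exact ⟨by simp [pvStCharge, hs], by simpa [pvStCharge, hs] using h⟩

lemma pvStageChir (t l : List Char) (i : Nat) (h : t.drop i = l) :
    pvChirA t i = pvStChir l := by
  have hhead : t[i]? = l.head? := by rw [pvGetDrop, h, List.head?_eq_getElem?]
  by_cases h0 : l.head? = some '@'
  case neg =>
    rw [pvChirA, if_neg (by rw [hhead]; exact h0), pvStChir, if_neg h0]
  case pos =>
    obtain ⟨l2, rfl⟩ : ∃ l2, l = '@' :: l2 := by
      cases l with
      | nil => cases h0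
      | cons c r => exact ⟨r, by simp_all⟩
    have hg : t[i]? = some '@' := by rw [hhead]; rfl
    have hd1 : t.drop (i + 1) = l2 := by rw [pvDropSucc, h]; rfl
    have hlen1 : l2.length = t.length - (i + 1) := by rw [← hd1, List.length_drop]
    have hlen1' : i + 1 ≤ t.length := by
      have : i < t.length := (List.getElem?_eq_some_iff.mp hg).1
      omega
    have hg1 : t[i + 1]? = l2.head? := by rw [pvGetDrop, hd1, List.head?_eq_getElem?]
    rw [pvChirA, if_pos hg, pvStChir, if_pos h0]
    have hdropStChir : ('@' :: l2).drop 1 = l2 := rfl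
    rw [hdropStChir]
    by_cases h1 : l2.head? = some '@'
    case pos =>
      obtain ⟨rest2, rfl⟩ : ∃ r2, l2 = '@' :: r2 := by
        cases l2 with
        | nil => cases h1
        | cons c r => exact ⟨r, by simp_all⟩
      rw [if_pos (by rw [hg1]; rfl), if_pos h1]
      dsimp only
      have hd2 : t.drop (i + 2) = rest2 := by
        have h2 : i + 2 = (i + 1) + 1 := by omega
        rw [h2, pvDropSucc, hd1]; rfl
      have hlen2 : rest2.length = t.length - (i + 2) := by rw [← hd2, List.length_drop]
      have hcond : (i + 2 + 1 < t.length) ↔ (2 ≤ rest2.length) := by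
        simp at hlen1; omega
      have hdrop2 : ('@' :: '@' :: rest2).drop (['@', '@'] : List Char).length = rest2 := rfl
      rw [hd2, hdrop2, pvChirTailB]
      by_cases hq : 2 ≤ rest2.length
      · rw [if_pos (hcond.mpr hq), if_pos hq]
      · rw [if_neg (fun hx => hq (hcond.mp hx)), if_neg hq]
    case neg =>
      rw [if_neg (by rw [hg1]; exact h1), if_neg h1]
      dsimp only
      have hcond : (i + 1 + 1 < t.length) ↔ (2 ≤ l2.length) := by
        omega
      have hdrop1 : ('@' :: l2).drop (['@'] : List Char).length = l2 := rfl
      rw [hd1, hdrop1, pvChirTailB]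
      by_cases hq : 2 ≤ l2.length
      · rw [if_pos (hcond.mpr hq), if_pos hq]
      · rw [if_neg (fun hx => hq (hcond.mp hx)), if_neg hq]

lemma pvA_norm (t : List Char) : pvAcore t = pvNorm t := by
  have h0 : t.drop 0 = t := by simp
  have hscan := pvScanA_eq pvDigitCh t t 0 [] h0
  have h1 : t.drop (0 + (t.takeWhile pvDigitCh).length) = t.dropWhile pvDigitCh := by
    simpa using pvDropLen pvDigitCh t
  obtain ⟨hE, hE2⟩ := pvStageElem t _ _ h1
  rcases hSE : pvStElem (t.dropWhile pvDigitCh) with ⟨elem, s2⟩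
  rw [hSE] at hE hE2
  obtain ⟨hH, hH2⟩ := pvStageH t s2 _ hE2
  rcases hSH : pvStH s2 with ⟨hstr, s3⟩
  rw [hSH] at hH hH2
  obtain ⟨hC, hC2⟩ := pvStageCharge t s3 _ hH2
  rcases hSC : pvStCharge s3 with ⟨charge, s4⟩
  rw [hSC] at hC hC2
  have hChir := pvStageChir t s4 _ hC2
  unfold pvAcore pvNorm
  rw [hscan]
  simp only [List.nil_append, hSE, hSH, hSC]
  rw [hE]
  simp only []
  rw [hH]
  simp only []
  rw [hC]
  simp only []
  rw [hChir]

lemma pvCore_eq (t : List Char) : pvAcore t = pvBcore t := by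
  rw [pvA_norm, pvB_norm]

-- ===== VERDICT (by name: the statement is the Claim_ definition above) =====
theorem parse_smiles_parenthesis_py_spec : Claim_equal_parse_smiles_parenthesis_py := by
  intro token _
  unfold Spec_parse_smiles_parenthesis_py parse_smiles_parenthesis_py parse_smiles_parenthesis_py_alt
  exact pvCore_eq _
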